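-- pv_equiv track=rewrite | github.com/yongwoo97/algorithm | gold/1407_2로 몇 번 나누어질까.py | calc
-- ===== SOURCE A (Python) =====
-- def calc(number) :
--   if number == 0 :
--     return 0
--   elif number == 1 :
--     return 1
--   elif number % 2 == 0 :
--     return number // 2 + 2 * calc(number // 2)
--   elif number % 2 == 1 :
--     return number // 2 + 2 * calc(number // 2) + 1
-- ===== SOURCE B (Python) =====
-- def calc(number):
--     if number < 0:
--         raise ValueError("number must be non-negative")
--     result = 0
--     factor = 1
--     while number > 0:
--         result += factor * (number // 2 + number % 2)
--         number //= 2
--         factor *= 2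
--     return result
-- ===== Notes on version B (the rewrite author's own statement) =====
-- stated objective: alternative
-- what changed: The recursion with 2*calc(number//2) weighting is replaced by an explicit iterative loop that accumulates factor*(number//2 + number%2) while halving, with no recursive calls and no base-case branches.
import Mathlib
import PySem

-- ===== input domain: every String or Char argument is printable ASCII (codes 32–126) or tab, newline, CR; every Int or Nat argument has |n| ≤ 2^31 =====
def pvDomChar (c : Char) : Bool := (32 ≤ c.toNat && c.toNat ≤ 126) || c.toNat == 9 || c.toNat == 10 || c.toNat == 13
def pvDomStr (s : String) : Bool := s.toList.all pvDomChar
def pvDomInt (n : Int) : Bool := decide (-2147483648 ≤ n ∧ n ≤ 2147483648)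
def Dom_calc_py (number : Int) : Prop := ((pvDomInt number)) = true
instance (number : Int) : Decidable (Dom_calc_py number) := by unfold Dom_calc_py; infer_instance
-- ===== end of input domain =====

-- B replaces A's recursion by an accumulating halving loop; on negative input both raise (outside Pre_).

-- ===== PORT A =====
-- A's recursion diverges for negative input; the fuel argument only guards Lean
-- totality and is always sufficient on Pre_ (number ≥ 0), where it is A step for step.
def calcGo (fuel : Nat) (number : Int) : Int :=
  match fuel with
  | 0 => 0
  | fuel + 1 =>
    if number = 0 then 0
    else if number = 1 then 1
    else if PySem.Int.mod number 2 = 0 then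
      PySem.Int.floordiv number 2 + 2 * calcGo fuel (PySem.Int.floordiv number 2)
    else if PySem.Int.mod number 2 = 1 then
      PySem.Int.floordiv number 2 + 2 * calcGo fuel (PySem.Int.floordiv number 2) + 1
    else 0

def calc_py (number : Int) : Int := calcGo (number.toNat + 1) number

-- ===== PORT B =====
-- B's initial 'raise ValueError' on negative input produces no value and lies outside Pre_;
-- the loop itself is ported step for step.
def altGo (number result factor : Int) : Int :=
  if h : number > 0 then
    altGo (PySem.Int.floordiv number 2)
      (result + factor * (PySem.Int.floordiv number 2 + PySem.Int.mod number 2))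
      (factor * 2)
  else result
termination_by number.toNat
decreasing_by
  have := PySem.Int.floordiv_eq_ediv_of_pos (a := number) (b := 2) (by omega)
  omega

def calc_py_alt (number : Int) : Int := altGo number 0 1

-- ===== PRECONDITION & SPEC =====
-- Pre_ excludes negative numbers, on which A raises RecursionError (and B raises ValueError).
def Pre_calc_py (number : Int) : Prop := 0 ≤ number
instance (number : Int) : Decidable (Pre_calc_py number) := by unfold Pre_calc_py; infer_instance
def pvWitness_calc_py : Int := 6

def Spec_calc_py (number : Int) (out : Int) : Prop := out = calc_py_alt number
instance (number : Int) (out : Int) : Decidable (Spec_calc_py number out) := by unfold Spec_calc_py; infer_instance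

-- ===== CLAIM (what is proved, stated in full; the proofs are below) =====
def Claim_equal_calc_py : Prop := ∀ (number : Int), Dom_calc_py number → Pre_calc_py number → Spec_calc_py number (calc_py number)

-- ===== LEMMAS AND PROOFS =====

-- fuel irrelevance: any sufficient fuel gives the same value on nonnegative input
theorem calcGo_fuel (k : Nat) : ∀ (fuel fuel' : Nat) (n : Int), 0 ≤ n → n.toNat = k →
    n.toNat < fuel → n.toNat < fuel' → calcGo fuel n = calcGo fuel' n := by
  induction k using Nat.strong_induction_on with
  | _ k ih =>
    intro fuel fuel' n hn hk hf hf'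
    match fuel, fuel' with
    | f + 1, f' + 1 =>
      simp only [calcGo]
      split
      · rfl
      · split
        · rfl
        · have h2 := PySem.Int.floordiv_eq_ediv_of_pos (a := n) (b := 2) (by omega)
          have hlt : (PySem.Int.floordiv n 2).toNat < k := by omega
          have := ih _ hlt f f' (PySem.Int.floordiv n 2) (by omega) rfl (by omega) (by omega)
          rw [h2] at this
          split <;> simp [this]

-- loop invariant: altGo n r f = r + f * calc_py n for n ≥ 0
theorem altGo_inv (k : Nat) : ∀ (n r f : Int), 0 ≤ n → n.toNat = k →
    altGo n r f = r + f * calc_py n := by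
  induction k using Nat.strong_induction_on with
  | _ k ih =>
    intro n r f hn hk
    rw [altGo]
    by_cases hpos : n > 0
    · simp only [hpos, dif_pos]
      have h2 := PySem.Int.floordiv_eq_ediv_of_pos (a := n) (b := 2) (by omega)
      have hm := PySem.Int.mod_eq_emod_of_pos (a := n) (b := 2) (by omega)
      have hlt : (PySem.Int.floordiv n 2).toNat < k := by omega
      rw [ih _ hlt _ _ _ (by omega) rfl]
      -- unfold one step of calc_py at n
      show _ = r + f * calcGo (n.toNat + 1) n
      by_cases h1 : n = 1
      · subst h1
        simp [calcGo, PySem.Int.floordiv, PySem.Int.mod, calc_py]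
      · have hn0 : n ≠ 0 := by omega
        have hfl : calcGo (n.toNat + 1) n =
            (if PySem.Int.mod n 2 = 0 then
              PySem.Int.floordiv n 2 + 2 * calcGo n.toNat (PySem.Int.floordiv n 2)
            else if PySem.Int.mod n 2 = 1 then
              PySem.Int.floordiv n 2 + 2 * calcGo n.toNat (PySem.Int.floordiv n 2) + 1
            else 0) := by
          simp [calcGo, hn0, h1]
        have hfuel : calcGo n.toNat (PySem.Int.floordiv n 2) = calc_py (PySem.Int.floordiv n 2) := by
          apply calcGo_fuel ((PySem.Int.floordiv n 2).toNat) _ _ _ (by omega) rfl (by omega) (by omega)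
        rw [hfl, hfuel]
        have hcases : n % 2 = 0 ∨ n % 2 = 1 := by omega
        rcases hcases with hc | hc <;> simp [hc] <;> ring
    · simp only [hpos, dif_neg, not_false_iff]
      have hz : n = 0 := by omega
      subst hz
      simp [calc_py, calcGo]

-- ===== VERDICT (by name: the statement is the Claim_ definition above) =====
theorem calc_py_spec : Claim_equal_calc_py := by
  intro n _ hpre
  unfold Spec_calc_py calc_py_alt
  rw [altGo_inv n.toNat n 0 1 hpre rfl]
  ring
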